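-- pv_equiv track=rewrite | github.com/d1mene/SBER_json_function | utils/process_query.py | get_query_token
-- ===== SOURCE A (Python) =====
-- def get_query_token(query_terms, window=2):
--     doc = []
--     for i in range(len(query_terms)-window+1):
--         token = query_terms[i]
--         for j in range(1, window):
--             token = ' '.join([token, query_terms[i+j]])
--         doc.append(token)
--     return doc
-- ===== SOURCE B (Python) =====
-- def get_query_token(query_terms, window=2):
--     if window > len(query_terms):
--         return []
--     shifted = [query_terms[j:] for j in range(window)]
--     return [' '.join(grams) for grams in zip(*shifted)]
-- ===== Notes on version B (the rewrite author's own statement) =====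
-- stated objective: idiomatic
-- what changed: A builds each n-gram with an explicit double-index loop (outer window start, inner repeated ' '.join of the next term); B forms the window-many shifted slices query_terms[j:], zips them into columns and joins each column once.
-- crash fix: On window <= 0 A raises IndexError (its outer range runs past the end of the list); B returns [] since zip of zero columns is empty. — e.g. on get_query_token(["a"], 0): A raises IndexError, B returns []
import Mathlib
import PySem

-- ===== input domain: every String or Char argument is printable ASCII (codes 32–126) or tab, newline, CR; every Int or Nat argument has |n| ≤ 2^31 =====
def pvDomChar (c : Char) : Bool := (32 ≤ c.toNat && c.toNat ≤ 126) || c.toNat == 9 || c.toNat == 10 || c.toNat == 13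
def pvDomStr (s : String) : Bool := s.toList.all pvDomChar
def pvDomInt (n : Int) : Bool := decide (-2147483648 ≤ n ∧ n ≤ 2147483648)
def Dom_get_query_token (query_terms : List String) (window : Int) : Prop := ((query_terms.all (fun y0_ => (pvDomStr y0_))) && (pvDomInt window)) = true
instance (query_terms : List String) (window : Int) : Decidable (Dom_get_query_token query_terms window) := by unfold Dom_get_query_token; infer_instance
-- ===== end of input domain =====

-- B replaces A's double-index window loop by zipping the window-many shifted slices
-- query_terms[j:] and joining each resulting column (objective: idiomatic).

-- ===== PORT A =====
def get_query_token (query_terms : List String) (window : Int) : List String :=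
  (PySem.List.pyRange 0 (query_terms.length - window + 1) 1).foldl
    (fun doc i =>
      let token := PySem.List.pyGetD query_terms i ""
      let token := (PySem.List.pyRange 1 window 1).foldl
        (fun token j => PySem.Str.join " " [token, PySem.List.pyGetD query_terms (i + j) ""]) token
      doc ++ [token]) []

-- ===== PORT B =====
-- hand port of zip(*cols): rows of heads until some column runs out; structurally
-- recursive on a copy of the first column (each step drops one element of every column,
-- in particular of the first). zip() of zero columns is the empty iterator.
def pyZipNAux : List String → List (List String) → List (List String)
  | [], _ => []
  | _ :: c0t, cols =>
    if cols.any List.isEmpty then []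
    else cols.map (fun c => c.headD "") :: pyZipNAux c0t (cols.map List.tail)

def pyZipN (cols : List (List String)) : List (List String) :=
  match cols with
  | [] => []
  | c :: _ => pyZipNAux c cols

def get_query_token_alt (query_terms : List String) (window : Int) : List String :=
  if (query_terms.length : Int) < window then []
  else
    let shifted := (PySem.List.pyRange 0 window 1).map
      (fun j => PySem.List.slice query_terms (some j) none)
    (pyZipN shifted).map (fun grams => PySem.Str.join " " grams)

-- ===== PRECONDITION & SPEC =====
-- Pre_: the Python A raises IndexError exactly when window ≤ 0 (the outer range then
-- runs past the end of the list); for window ≥ 1 every index A reads is in range.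
def Pre_get_query_token (query_terms : List String) (window : Int) : Prop := 1 ≤ window
instance (query_terms : List String) (window : Int) : Decidable (Pre_get_query_token query_terms window) := by unfold Pre_get_query_token; infer_instance

def pvWitness_get_query_token : List String × Int := (["red", "fox", "jumps"], 2)

-- Where A raises (IndexError, on every window ≤ 0) B returns []: zip of zero columns is empty.
def Raises_get_query_token (query_terms : List String) (window : Int) : Prop := window ≤ 0
instance (query_terms : List String) (window : Int) : Decidable (Raises_get_query_token query_terms window) := by unfold Raises_get_query_token; infer_instance
def pvRaiseWitness_get_query_token : List String × Int := (["a"], 0)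
def pvRaiseWitnessOut_get_query_token : List String := []

def Spec_get_query_token (query_terms : List String) (window : Int) (out : List String) : Prop := out = get_query_token_alt query_terms window
instance (query_terms : List String) (window : Int) (out : List String) : Decidable (Spec_get_query_token query_terms window out) := by unfold Spec_get_query_token; infer_instance

-- ===== CLAIM (what is proved, stated in full; the proofs are below) =====
def Claim_equal_get_query_token : Prop := ∀ (query_terms : List String) (window : Int), Dom_get_query_token query_terms window → Pre_get_query_token query_terms window → Spec_get_query_token query_terms window (get_query_token query_terms window)

def Claim_raises_get_query_token : Prop := (∀ (query_terms : List String) (window : Int), Dom_get_query_token query_terms window → Raises_get_query_token query_terms window → ¬ Pre_get_query_token query_terms window) ∧ (Dom_get_query_token (pvRaiseWitness_get_query_token.1) (pvRaiseWitness_get_query_token.2) ∧ Raises_get_query_token (pvRaiseWitness_get_query_token.1) (pvRaiseWitness_get_query_token.2) ∧ get_query_token_alt (pvRaiseWitness_get_query_token.1) (pvRaiseWitness_get_query_token.2) = pvRaiseWitnessOut_get_query_token)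

-- ===== LEMMAS AND PROOFS =====

theorem charsJoinSnoc (sep q : List Char) : ∀ (l : List (List Char)), l ≠ [] →
    PySem.Chars.join sep (l ++ [q]) = PySem.Chars.join sep l ++ sep ++ q
  | [], h => absurd rfl h
  | [p], _ => by
      simp [PySem.Chars.join_cons_cons, PySem.Chars.join_singleton]
  | p :: p2 :: rest, _ => by
      have ih := charsJoinSnoc sep q (p2 :: rest) (by simp)
      rw [show (p :: p2 :: rest) ++ [q] = p :: (p2 :: rest ++ [q]) from rfl]
      rw [show p2 :: rest ++ [q] = p2 :: (rest ++ [q]) from rfl] at *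
      rcases h : rest ++ [q] with _ | ⟨r, rs⟩
      · simp at h
      · rw [PySem.Chars.join_cons_cons, ← h, ih, PySem.Chars.join_cons_cons]
        simp [List.append_assoc]

theorem strJoinSnoc (l : List String) (q : String) (h : l ≠ []) :
    PySem.Str.join " " (l ++ [q]) = PySem.Str.join " " [PySem.Str.join " " l, q] := by
  simp only [PySem.Str.join, List.map_append, List.map_cons, List.map_nil,
    String.toList_ofList, PySem.Chars.join_cons_cons, PySem.Chars.join_singleton]
  rw [charsJoinSnoc _ _ _ (by simpa using h)]

theorem zip_shifts (W : Nat) (hW : 1 ≤ W) : ∀ (qs : List String),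
    pyZipN ((List.range W).map (fun j => qs.drop j)) =
      (List.range (qs.length + 1 - W)).map
        (fun i => (List.range W).map (fun j => qs.getD (i + j) ""))
  | [] => by
      have h0 : (List.nil (α := String)).length + 1 - W = 0 := by simp; omega
      rw [h0]
      obtain ⟨W', rfl⟩ : ∃ W', W = W' + 1 := ⟨W - 1, by omega⟩
      simp [List.range_succ_eq_map, pyZipN, pyZipNAux]
  | x :: t => by
      obtain ⟨W', rfl⟩ : ∃ W', W = W' + 1 := ⟨W - 1, by omega⟩
      have hhead : (List.range (W' + 1)).map (fun j => (x :: t).drop j) =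
          (x :: t) :: (List.range W').map (fun j => (x :: t).drop (j + 1)) := by
        simp [List.range_succ_eq_map, List.map_map]
      rw [hhead]
      by_cases hlen : t.length + 1 < W' + 1
      · have hany : (((x :: t) :: (List.range W').map (fun j => (x :: t).drop (j+1))).any List.isEmpty) = true := by
          simp only [List.any_cons, List.any_map, Bool.or_eq_true, List.any_eq_true]
          right
          refine ⟨t.length, ?_, ?_⟩
          · simp only [List.mem_range]; omega
          · simp
        have h0 : (x :: t).length + 1 - (W' + 1) = 0 := by simp; omega
        rw [h0]
        simp only [pyZipN, pyZipNAux, hany, if_true, List.range_zero, List.map_nil]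
      · have hany : (((x :: t) :: (List.range W').map (fun j => (x :: t).drop (j+1))).any List.isEmpty) = false := by
          rw [List.any_eq_false]
          intro c hc
          rcases List.mem_cons.mp hc with rfl | hc
          · simp
          · obtain ⟨j, hj, rfl⟩ := List.mem_map.mp hc
            rw [List.mem_range] at hj
            simp only [List.isEmpty_iff, List.drop_eq_nil_iff, List.length_cons]
            omega
        have htails : (((x :: t) :: (List.range W').map (fun j => (x :: t).drop (j+1))).map List.tail)
            = (List.range (W' + 1)).map (fun j => t.drop j) := by
          simp only [List.map_cons, List.map_map, List.range_succ_eq_map, List.tail_cons]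
          congr 1
          apply List.map_congr_left
          intro j _
          simp [Function.comp, List.tail_drop]
        have ih := zip_shifts (W' + 1) hW t
        have haux : pyZipNAux (x :: t) ((x :: t) :: (List.range W').map (fun j => (x :: t).drop (j+1)))
            = (((x :: t) :: (List.range W').map (fun j => (x :: t).drop (j+1))).map (fun c => c.headD ""))
              :: pyZipN ((List.range (W' + 1)).map (fun j => t.drop j)) := by
          rw [pyZipNAux, if_neg (by rw [Bool.not_eq_true]; exact hany), htails]
          congr 1
          rcases ht : t with _ | ⟨y, ys⟩
          · simp [List.range_succ_eq_map, pyZipN]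
          · simp only [pyZipN, List.range_succ_eq_map, List.map_cons, List.drop_zero]
        rw [show pyZipN ((x :: t) :: (List.range W').map (fun j => (x :: t).drop (j+1)))
              = pyZipNAux (x :: t) ((x :: t) :: (List.range W').map (fun j => (x :: t).drop (j+1))) from rfl,
            haux, ih]
        have hn : (x :: t).length + 1 - (W' + 1) = (t.length + 1 - (W' + 1)) + 1 := by simp; omega
        rw [hn]
        rw [show List.range ((t.length + 1 - (W' + 1)) + 1)
              = 0 :: List.map Nat.succ (List.range (t.length + 1 - (W' + 1)))
            from List.range_succ_eq_map]
        rw [List.map_cons, List.map_map]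
        congr 1
        · -- heads row = row 0
          simp only [List.headD_cons]
          rw [show List.range (W' + 1) = 0 :: List.map Nat.succ (List.range W')
              from List.range_succ_eq_map]
          simp only [List.map_cons, List.map_map]
          congr 1
          apply List.map_congr_left
          intro j _
          simp [Function.comp]
        · rw [List.map_map]
          apply List.map_congr_left
          intro i _
          simp only [Function.comp]
          apply List.map_congr_left
          intro a _
          simp only [List.getD_eq_getElem?_getD]
          have h2 : i + 1 + a = (i + a) + 1 := by omega
          rw [h2, List.getElem?_cons_succ]


theorem strJoin_single (p : String) : PySem.Str.join " " [p] = p := by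
  simp [PySem.Str.join, PySem.Chars.join_singleton]

theorem inner_fold (qs : List String) : ∀ (W : Nat), 1 ≤ W → ∀ (k : Nat),
    (PySem.List.pyRange 1 ((W : Int)) 1).foldl
      (fun token j => PySem.Str.join " " [token, PySem.List.pyGetD qs ((k : Int) + j) ""])
      (PySem.List.pyGetD qs ((k : Int)) "")
    = PySem.Str.join " " ((List.range W).map (fun j => qs.getD (k + j) ""))
  | 0, h, _ => by omega
  | 1, _, k => by
      rw [PySem.List.pyRange_one_eq_nil (by norm_num)]
      simp [strJoin_single, PySem.List.pyGetD_natCast]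
  | (W + 2), _, k => by
      have ih := inner_fold qs (W + 1) (by omega) k
      have hcast : (((W + 2 : Nat)) : Int) = ((W + 1 : Nat) : Int) + 1 := by push_cast; ring
      rw [hcast, PySem.List.pyRange_one_succ_right (by push_cast; omega), List.foldl_append, ih]
      simp only [List.foldl_cons, List.foldl_nil]
      have hg : PySem.List.pyGetD qs ((k : Int) + ((W + 1 : Nat) : Int)) "" = qs.getD (k + (W + 1)) "" := by
        rw [show ((k : Int) + ((W + 1 : Nat) : Int)) = (((k + (W + 1)) : Nat) : Int) by push_cast; ring,
          PySem.List.pyGetD_natCast]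
      rw [hg, ← strJoinSnoc _ _ (by simp), List.range_succ (n := W + 1), List.map_append]
      simp

theorem main_eq (qs : List String) (w : Int) (hpre : 1 ≤ w) :
    get_query_token qs w = get_query_token_alt qs w := by
  obtain ⟨W, hW, hW1⟩ : ∃ W : Nat, (W : Int) = w ∧ 1 ≤ W := ⟨w.toNat, by omega, by omega⟩
  subst hW
  simp only [get_query_token, get_query_token_alt]
  by_cases hbig : (qs.length : Int) < (W : Int)
  · rw [if_pos hbig, PySem.List.pyRange_one_eq_nil (a := 0) (b := (qs.length : Int) - (W : Int) + 1) (by omega), List.foldl_nil]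
  rw [if_neg hbig]
  rw [PySem.List.foldl_append_singleton_eq_map
      (f := fun i => (PySem.List.pyRange 1 (W : Int) 1).foldl
        (fun token j => PySem.Str.join " " [token, PySem.List.pyGetD qs (i + j) ""])
        (PySem.List.pyGetD qs i ""))]
  rw [List.nil_append, PySem.List.pyRange_zero, List.map_map]
  rw [PySem.List.pyRange_zero, List.map_map]
  have hshift : (List.range ((W : Int)).toNat).map
        ((fun j => PySem.List.slice qs (some j) none) ∘ (fun k : Nat => (k : Int)))
      = (List.range W).map (fun j => qs.drop j) := by
    rw [Int.toNat_natCast]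
    apply List.map_congr_left
    intro j _
    simp [Function.comp, PySem.List.slice_from_natCast]
  rw [hshift, zip_shifts W hW1 qs, List.map_map]
  have hM : ((qs.length : Int) - (W : Int) + 1).toNat = qs.length + 1 - W := by omega
  rw [hM]
  apply List.map_congr_left
  intro k hk
  simp only [Function.comp]
  exact inner_fold qs W hW1 k

-- ===== VERDICT =====
theorem get_query_token_spec : Claim_equal_get_query_token := by
  intro qs w _ hpre
  unfold Spec_get_query_token
  exact main_eq qs w hpre

theorem get_query_token_raises : Claim_raises_get_query_token := by
  unfold Claim_raises_get_query_token
  refine ⟨fun _ w _ hw => ?_, by decide⟩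
  unfold Raises_get_query_token at hw
  unfold Pre_get_query_token
  omega

-- self-check: the raise witness indeed lies inside Raises_ (reads the proved claim back)
theorem pvRaiseWitnessIn_ok :
    Raises_get_query_token pvRaiseWitness_get_query_token.1 pvRaiseWitness_get_query_token.2 :=
  get_query_token_raises.2.2.1
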